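-- pv_equiv track=rewrite | github.com/aaa997/snake_board.py | week8/lab8/lab8.py | num_different_permutations_helper
-- ===== SOURCE A (Python) =====
-- def num_different_permutations_helper(word, index):
--     if index >= len(word) - 1:
--         return 1
--     c = 0
--     for i in range(index, len(word)):
--         if word[i] not in word[index:i]:
--             word[index], word[i] = word[i], word[index]
--             c += num_different_permutations_helper(word, index+1)
--             word[index], word[i] = word[i], word[index]
--     return c
-- ===== SOURCE B (Python) =====
-- def num_different_permutations_helper(word, index):
--     # multinomial coefficient: n! // product of per-value count factorials,
--     # computed over the suffix word[index:]
--     suffix = word[index:]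
--     n = len(suffix)
--     counts = {}
--     for x in suffix:
--         counts[x] = counts.get(x, 0) + 1
--     res = 1
--     for k in range(1, n + 1):
--         res *= k
--     for c in counts.values():
--         f = 1
--         for k in range(1, c + 1):
--             f *= k
--         res //= f
--     return res
-- ===== Notes on version B (the rewrite author's own statement) =====
-- stated objective: faster
-- what changed: replaces the in-place-swap recursion that enumerates every distinct-permutation branch with the closed-form multinomial coefficient n!/prod(count(x)!) computed in one counting pass over the suffix; intended as faster (measured 6.72x at n=16; A times out at larger sizes where B still returns)
-- outside the precondition, e.g. on num_different_permutations_helper([1, 2], -1): A returns 6, B returns 1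
import Mathlib
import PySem

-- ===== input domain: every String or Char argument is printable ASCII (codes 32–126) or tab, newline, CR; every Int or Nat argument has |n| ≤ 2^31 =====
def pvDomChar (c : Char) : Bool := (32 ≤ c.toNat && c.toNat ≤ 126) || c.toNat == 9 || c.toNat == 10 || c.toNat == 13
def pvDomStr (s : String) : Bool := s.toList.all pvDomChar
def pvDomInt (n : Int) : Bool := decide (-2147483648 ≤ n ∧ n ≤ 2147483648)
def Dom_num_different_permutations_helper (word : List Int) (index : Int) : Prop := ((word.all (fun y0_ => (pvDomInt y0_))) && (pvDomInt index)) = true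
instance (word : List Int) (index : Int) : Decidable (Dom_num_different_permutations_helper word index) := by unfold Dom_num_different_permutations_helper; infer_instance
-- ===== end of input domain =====

-- B replaces A's swap-and-recurse enumeration of distinct-permutation branches by the
-- closed-form multinomial coefficient n!/prod(count!) of the suffix (one counting pass).
-- A swaps word's elements in place but always swaps them back; the equivalence proved
-- here is about the return value.
-- ===== PORT A =====
-- simultaneous swap 'word[index], word[i] = word[i], word[index]'
def pvSwap (w : List Int) (a b : Int) : List Int :=
  PySem.List.pySetD (PySem.List.pySetD w a (PySem.List.pyGetD w b 0)) b (PySem.List.pyGetD w a 0)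

-- recursion made explicit with fuel (word.length + 1 suffices for index ≥ 0);
-- the list is threaded as state because A swaps in place and swaps back
def pvGoA : Nat → List Int → Int → Int × List Int
  | 0, w, _ => (1, w)
  | fuel+1, w, index =>
    if index ≥ PySem.List.len w - 1 then (1, w)
    else
      (PySem.List.pyRange index (PySem.List.len w) 1).foldl
        (fun st i =>
          if ¬ (PySem.List.pyGetD st.2 i 0 ∈ PySem.List.slice st.2 (some index) (some i)) then
            let w1 := pvSwap st.2 index i
            let r := pvGoA fuel w1 (index + 1)
            (st.1 + r.1, pvSwap r.2 index i)
          else st)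
        (0, w)

def num_different_permutations_helper (word : List Int) (index : Int) : Int :=
  (pvGoA (word.length + 1 + index.natAbs) word index).1

-- ===== PORT B =====
def num_different_permutations_helper_alt (word : List Int) (index : Int) : Int :=
  let suffix := PySem.List.slice word (some index) none
  let n := suffix.length
  let counts := suffix.foldl (fun d x => PySem.Dict.modify d x 0 (· + 1)) PySem.Dict.empty
  let res := (PySem.List.pyRange 1 ((n : Int) + 1) 1).foldl (fun r k => r * k) 1
  (PySem.Dict.values counts).foldl
    (fun r c =>
      let f := (PySem.List.pyRange 1 (c + 1) 1).foldl (fun f k => f * k) 1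
      PySem.Int.floordiv r f) res

-- ===== PRECONDITION & SPEC =====
-- Pre_ excludes negative indices: there A either raises IndexError or returns a value
-- produced by Python's negative-index/slice wraparound, a corner no caller uses.
def Pre_num_different_permutations_helper (word : List Int) (index : Int) : Prop := 0 ≤ index
instance (word : List Int) (index : Int) : Decidable (Pre_num_different_permutations_helper word index) := by unfold Pre_num_different_permutations_helper; infer_instance
def pvWitness_num_different_permutations_helper : List Int × Int := ([1, 1, 2], 0)
def Spec_num_different_permutations_helper (word : List Int) (index : Int) (out : Int) : Prop := out = num_different_permutations_helper_alt word index
instance (word : List Int) (index : Int) (out : Int) : Decidable (Spec_num_different_permutations_helper word index out) := by unfold Spec_num_different_permutations_helper; infer_instance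

-- ===== CLAIM (what is proved, stated in full; the proofs are below) =====
def Claim_equal_num_different_permutations_helper : Prop := ∀ (word : List Int) (index : Int), Dom_num_different_permutations_helper word index → Pre_num_different_permutations_helper word index → Spec_num_different_permutations_helper word index (num_different_permutations_helper word index)

-- ===== LEMMAS AND PROOFS =====

-- multinomial spec: number of distinct permutations of (the multiset of) l
def pvFacs (l : List Int) : ℕ := ∏ x ∈ l.toFinset, (l.count x).factorial
def pvPC (l : List Int) : ℕ := l.length.factorial / pvFacs l

lemma pvFacs_pos (l : List Int) : 0 < pvFacs l :=
  Finset.prod_pos (fun _ _ => Nat.factorial_pos _)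

lemma pvFacs_dvd (l : List Int) : pvFacs l ∣ l.length.factorial := by
  have h := Nat.prod_factorial_dvd_factorial_sum l.toFinset (fun x => l.count x)
  rwa [List.sum_toFinset_count_eq_length] at h

lemma pvPC_mul (l : List Int) : pvPC l * pvFacs l = l.length.factorial :=
  Nat.div_mul_cancel (pvFacs_dvd l)

lemma pvPC_perm {l l' : List Int} (h : l.Perm l') : pvPC l = pvPC l' := by
  unfold pvPC pvFacs
  rw [List.toFinset_eq_of_perm _ _ h, h.length_eq]
  congr 1
  exact Finset.prod_congr rfl (fun x _ => by rw [h.count_eq])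

lemma pvPC_short {l : List Int} (h : l.length ≤ 1) : pvPC l = 1 := by
  match l, h with
  | [], _ => simp [pvPC, pvFacs]
  | [x], _ => simp [pvPC, pvFacs]

lemma pvFacs_erase {l : List Int} {x : Int} (hx : x ∈ l) :
    pvFacs l = l.count x * pvFacs (l.erase x) := by
  have hsub : (l.erase x).toFinset ⊆ l.toFinset := by
    intro y hy
    simp only [List.mem_toFinset] at *
    exact List.mem_of_mem_erase hy
  have hE : pvFacs (l.erase x) = ∏ y ∈ l.toFinset, ((l.erase x).count y).factorial := by
    unfold pvFacs
    refine Finset.prod_subset (f := fun y => ((l.erase x).count y).factorial) hsub ?_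
    intro y _ hny
    simp only [List.mem_toFinset] at hny
    simp [List.count_eq_zero.mpr hny]
  rw [hE]
  unfold pvFacs
  have hxF : x ∈ l.toFinset := List.mem_toFinset.mpr hx
  rw [← Finset.mul_prod_erase l.toFinset (fun y => (l.count y).factorial) hxF,
      ← Finset.mul_prod_erase l.toFinset (fun y => ((l.erase x).count y).factorial) hxF]
  have h1 : ∏ y ∈ l.toFinset.erase x, ((l.erase x).count y).factorial
      = ∏ y ∈ l.toFinset.erase x, (l.count y).factorial := by
    refine Finset.prod_congr rfl (fun y hy => ?_)
    have hne : y ≠ x := (Finset.mem_erase.mp hy).1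
    rw [List.count_erase]
    simp [hne.symm]
  rw [h1, List.count_erase_self, ← mul_assoc]
  congr 1
  have hc : 0 < l.count x := List.count_pos_iff.mpr hx
  obtain ⟨m, hm⟩ : ∃ m, l.count x = m + 1 := ⟨l.count x - 1, by omega⟩
  rw [hm]
  simp [Nat.factorial_succ]

lemma pvPC_rec {l : List Int} (h : l ≠ []) :
    ∑ x ∈ l.toFinset, pvPC (l.erase x) = pvPC l := by
  apply Nat.eq_of_mul_eq_mul_right (pvFacs_pos l)
  rw [pvPC_mul, Finset.sum_mul]
  have hstep : ∀ x ∈ l.toFinset,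
      pvPC (l.erase x) * pvFacs l = l.count x * (l.length - 1).factorial := by
    intro x hx
    have hxl : x ∈ l := List.mem_toFinset.mp hx
    rw [pvFacs_erase hxl, mul_comm (l.count x), ← mul_assoc, pvPC_mul,
        List.length_erase_of_mem hxl, mul_comm]
  rw [Finset.sum_congr rfl hstep, ← Finset.sum_mul, List.sum_toFinset_count_eq_length]
  obtain ⟨m, hm⟩ : ∃ m, l.length = m + 1 :=
    ⟨l.length - 1, by cases l with | nil => exact absurd rfl h | cons a t => simp⟩
  rw [hm]
  simp [Nat.factorial_succ]

-- positions that hold the first occurrence of their value enumerate l.toFinset \ s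
lemma pvFirstOcc_sum (f : Int → ℕ) :
    ∀ (l : List Int) (s : Finset Int),
    ∑ j ∈ Finset.range l.length,
        (if l.getD j 0 ∈ s ∨ l.getD j 0 ∈ l.take j then 0 else f (l.getD j 0))
      = ∑ x ∈ l.toFinset \ s, f x
  | [], s => by simp
  | d :: t, s => by
    rw [List.length_cons, Finset.sum_range_succ']
    have hshift : ∑ j ∈ Finset.range t.length,
        (if (d :: t).getD (j + 1) 0 ∈ s ∨ (d :: t).getD (j + 1) 0 ∈ (d :: t).take (j + 1)
         then 0 else f ((d :: t).getD (j + 1) 0))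
        = ∑ j ∈ Finset.range t.length,
        (if t.getD j 0 ∈ insert d s ∨ t.getD j 0 ∈ t.take j then 0 else f (t.getD j 0)) := by
      refine Finset.sum_congr rfl (fun j _ => ?_)
      simp only [List.getD_cons_succ, List.take_succ_cons]
      refine if_congr ?_ rfl rfl
      simp only [List.mem_cons, Finset.mem_insert]
      tauto
    rw [hshift, pvFirstOcc_sum f t (insert d s)]
    by_cases hd : d ∈ s
    · have hset : t.toFinset \ insert d s = (d :: t).toFinset \ s := by
        ext x
        by_cases hxd : x = d <;> simp [hxd, hd]
      rw [hset]
      simp [hd]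
    · have hset : (d :: t).toFinset \ s = insert d (t.toFinset \ insert d s) := by
        ext x
        by_cases hxd : x = d <;> simp [hxd, hd]
      have hnotin : d ∉ t.toFinset \ insert d s := by simp
      rw [hset, Finset.sum_insert hnotin]
      simp [hd, add_comm]

-- B-side: the three loops of the alt port
lemma pvFactFold : ∀ (n : ℕ),
    (PySem.List.pyRange 1 ((n : ℤ) + 1) 1).foldl (fun r k => r * k) 1 = (n.factorial : ℤ)
  | 0 => by rw [PySem.List.pyRange_one_eq_nil (by omega)]; rfl
  | n + 1 => by
    have h : ((n + 1 : ℕ) : ℤ) + 1 = ((n : ℤ) + 1) + 1 := by push_cast; ring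
    rw [h, PySem.List.pyRange_one_succ_right (by omega), List.foldl_append, pvFactFold n]
    simp only [List.foldl_cons, List.foldl_nil, Nat.factorial_succ]
    push_cast
    ring

lemma pvDivFold (cnt : Int → ℕ) : ∀ (ks : List Int) (M : ℕ),
    ks.foldl (fun r k => PySem.Int.floordiv r
        ((PySem.List.pyRange 1 ((cnt k : ℤ) + 1) 1).foldl (fun f j => f * j) 1)) (M : ℤ)
      = ((M / (ks.map (fun k => (cnt k).factorial)).prod : ℕ) : ℤ)
  | [], M => by simp
  | k :: ks, M => by
    simp only [List.foldl_cons, List.map_cons, List.prod_cons]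
    rw [pvFactFold (cnt k), PySem.Int.floordiv_natCast,
        pvDivFold cnt ks (M / (cnt k).factorial), Nat.div_div_eq_div_mul]

lemma pvValuesCounter (l : List Int) :
    (PySem.Dict.counter l).values = (PySem.List.dedup l).map (fun k => ((l.count k : ℕ) : ℤ)) := by
  show ((PySem.Dict.counter l).items).map Prod.snd = _
  rw [PySem.Dict.items_counter, List.map_map, PySem.List.dedup_eq_ofList]
  rfl

lemma pvFacs_eq_dedup (l : List Int) :
    pvFacs l = ((PySem.List.dedup l).map (fun k => (l.count k).factorial)).prod := by
  rw [← List.prod_toFinset _ (PySem.List.nodup_dedup l)]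
  unfold pvFacs
  congr 1
  ext x
  simp only [List.mem_toFinset, PySem.List.mem_dedup]

lemma pvAlt_spec (word : List Int) (p : ℕ) :
    num_different_permutations_helper_alt word (p : ℤ) = ((pvPC (word.drop p) : ℕ) : ℤ) := by
  unfold num_different_permutations_helper_alt
  simp only [PySem.List.slice_from_natCast]
  rw [← PySem.Dict.counter_eq_foldl, pvValuesCounter (word.drop p),
      pvFactFold (word.drop p).length, List.foldl_map,
      pvDivFold (fun k => (word.drop p).count k) (PySem.List.dedup (word.drop p))
        (word.drop p).length.factorial,
      ← pvFacs_eq_dedup]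
  rfl

-- A-side: the loop body of pvGoA, named for the proofs (definitionally the port's lambda)
def pvBody (fuel : Nat) (index : Int) : (Int × List Int) → Int → (Int × List Int) := fun st i =>
  if ¬ (PySem.List.pyGetD st.2 i 0 ∈ PySem.List.slice st.2 (some index) (some i)) then
    let w1 := pvSwap st.2 index i
    let r := pvGoA fuel w1 (index + 1)
    (st.1 + r.1, pvSwap r.2 index i)
  else st

lemma pvGoA_succ (fuel : ℕ) (w : List Int) (index : Int) :
    pvGoA (fuel + 1) w index =
      if index ≥ PySem.List.len w - 1 then (1, w)
      else (PySem.List.pyRange index (PySem.List.len w) 1).foldl (pvBody fuel index) (0, w) := rfl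

lemma pvSwap_eq (w : List Int) (a b : ℕ) (ha : a < w.length) (hb : b < w.length) :
    pvSwap w (a : ℤ) (b : ℤ) = (w.set a w[b]).set b w[a] := by
  unfold pvSwap
  rw [PySem.List.pyGetD_natCast, PySem.List.pyGetD_natCast,
      PySem.List.pySetD_natCast, PySem.List.pySetD_natCast,
      List.getD_eq_getElem w 0 ha, List.getD_eq_getElem w 0 hb]

lemma pvSwap_swap (w : List Int) (a b : ℕ) (ha : a < w.length) (hb : b < w.length) :
    pvSwap (pvSwap w (a : ℤ) (b : ℤ)) (a : ℤ) (b : ℤ) = w := by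
  rw [pvSwap_eq w a b ha hb]
  have h1 : ((w.set a w[b]).set b w[a]).length = w.length := by simp
  rw [pvSwap_eq _ a b (by omega) (by omega)]
  apply List.ext_getElem (by simp)
  intro i hi hi'
  simp only [List.getElem_set]
  split_ifs <;> simp_all

lemma pvSet_perm_erase (d x : Int) (t : List Int) (k : ℕ) (hk : k < t.length)
    (hx : x = t[k]) (hnd : x ≠ d) :
    (t.set k d).Perm ((d :: t).erase x) := by
  rw [List.perm_iff_count]
  intro y
  have ht : t = t.take k ++ x :: t.drop (k + 1) := by
    conv_lhs => rw [← List.take_append_drop k t]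
    rw [List.drop_eq_getElem_cons hk, ← hx]
  have hset : t.set k d = t.take k ++ d :: t.drop (k + 1) := by
    rw [List.set_eq_take_append_cons_drop, if_pos hk]
  rw [List.count_erase, hset]
  conv_rhs => rw [show d :: t = d :: (t.take k ++ x :: t.drop (k + 1)) from congrArg _ ht]
  clear ht hset hx hk
  simp only [List.count_append, List.count_cons, beq_iff_eq]
  by_cases hyd : d = y <;> by_cases hyx : x = y
  · exact absurd (hyx.trans hyd.symm) hnd
  · simp [hyd, hyx]; omega
  · simp [hyd, hyx]
  · simp [hyd, hyx]

lemma pvErase_head : ∀ (l : List Int) (h : 0 < l.length), l.erase (l[0]'h) = l.tail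
  | _ :: _, _ => by simp

lemma pvCons_head_tail : ∀ (l : List Int) (h : 0 < l.length), l = l[0]'h :: l.tail
  | _ :: _, _ => rfl

-- loop invariant for the A port's range-fold: each iteration restores w and adds
-- the recursive count of the suffix with position j's value moved to the front
lemma pvLoop (fuel : ℕ) (w : List Int) (p : ℕ)
    (IH : ∀ (w' : List Int), w'.length - (p + 1) < fuel →
        pvGoA fuel w' ((p : ℤ) + 1) = (((pvPC (w'.drop (p + 1)) : ℕ) : ℤ), w'))
    (hlen : p + 1 < w.length) (hfuel : w.length - (p + 1) < fuel) :
    ∀ (m k : ℕ) (c : Int), k + m = w.length - p →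
    (PySem.List.pyRange ((p : ℤ) + (k : ℤ)) ((w.length : ℤ)) 1).foldl (pvBody fuel (p : ℤ)) (c, w)
      = (c + ((∑ j ∈ Finset.Ico k (w.length - p),
          (if (w.drop p).getD j 0 ∈ (w.drop p).take j then 0
           else pvPC ((w.drop p).erase ((w.drop p).getD j 0))) : ℕ) : ℤ), w) := by
  intro m
  induction m with
  | zero =>
    intro k c hk
    rw [PySem.List.pyRange_one_eq_nil (by omega)]
    have hkk : k = w.length - p := by omega
    subst hkk
    simp
  | succ m ihm =>
    intro k c hk
    have hklt : k < w.length - p := by omega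
    have hpk : p + k < w.length := by omega
    rw [PySem.List.pyRange_one_cons (by omega), List.foldl_cons]
    have hcast : ((p : ℤ) + (k : ℤ)) = ((p + k : ℕ) : ℤ) := by push_cast; ring
    set l := w.drop p with hl
    have hllen : l.length = w.length - p := by simp [hl]
    have hkl : k < l.length := by omega
    have hget : PySem.List.pyGetD w ((p : ℤ) + (k : ℤ)) 0 = l[k]'hkl := by
      rw [hcast, PySem.List.pyGetD_natCast, List.getD_eq_getElem w 0 hpk]
      simp [hl]
    have hslice : PySem.List.slice w (some (p : ℤ)) (some ((p : ℤ) + (k : ℤ))) = l.take k := by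
      rw [show ((k : ℤ)) = ((k : ℕ) : ℤ) from rfl, PySem.List.slice_natCast_add]
    have hgetD : l.getD k 0 = l[k]'hkl := List.getD_eq_getElem l 0 hkl
    have hnext : ((p : ℤ) + (k : ℤ)) + 1 = ((p : ℤ) + ((k + 1 : ℕ) : ℤ)) := by push_cast; ring
    by_cases hmem : l[k]'hkl ∈ l.take k
    · have hbody : pvBody fuel (p : ℤ) (c, w) ((p : ℤ) + (k : ℤ)) = (c, w) := by
        unfold pvBody
        simp only [hget, hslice]
        rw [if_neg (by simpa using hmem)]
      rw [hbody, hnext, ihm (k + 1) c (by omega)]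
      rw [Finset.sum_eq_sum_Ico_succ_bot hklt]
      rw [if_pos (by rwa [hgetD])]
      simp
    · -- first occurrence of this value: swap, recurse, swap back
      have hswap1 : pvSwap w (p : ℤ) ((p : ℤ) + (k : ℤ))
          = (w.set p (w[p + k]'hpk)).set (p + k) (w[p]'(by omega)) := by
        rw [hcast]
        exact pvSwap_eq w p (p + k) (by omega) hpk
      set w1 := (w.set p (w[p + k]'hpk)).set (p + k) (w[p]'(by omega)) with hw1
      have hw1len : w1.length = w.length := by simp [hw1]
      have hIH := IH w1 (by omega)
      have hswapback : pvSwap w1 (p : ℤ) ((p : ℤ) + (k : ℤ)) = w := by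
        rw [hcast, ← hswap1, hcast]
        exact pvSwap_swap w p (p + k) (by omega) hpk
      have hbody : pvBody fuel (p : ℤ) (c, w) ((p : ℤ) + (k : ℤ))
          = (c + ((pvPC (w1.drop (p + 1)) : ℕ) : ℤ), w) := by
        unfold pvBody
        simp only [hget, hslice]
        rw [if_pos (by simpa using hmem)]
        simp only [hswap1, hIH, hswapback]
      have hval : pvPC (w1.drop (p + 1)) = pvPC (l.erase (l[k]'hkl)) := by
        have hdt : w.drop (p + 1) = l.tail := by
          rw [hl, List.tail_drop]
        rcases Nat.eq_zero_or_pos k with hk0 | hkpos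
        · subst hk0
          have hw1w : w1 = w := by
            rw [hw1]
            simp only [Nat.add_zero, List.set_getElem_self]
          rw [hw1w, hdt, pvErase_head l (by omega)]
        · have hdrop : w1.drop (p + 1) = (l.tail).set (k - 1) (l[0]'(by omega)) := by
            rw [hw1, List.drop_set, if_neg (by omega), List.drop_set, if_pos (by omega), hdt]
            congr 1
            · omega
            · simp [hl]
          have hlt : k - 1 < l.tail.length := by simp [List.length_tail]; omega
          have htk : (l.tail)[k - 1]'hlt = l[k]'hkl := by
            simp only [← List.drop_one, List.getElem_drop]
            congr 1
            omega
          have hne : l[k]'hkl ≠ l[0]'(by omega) := by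
            intro hrr
            apply hmem
            rw [hrr]
            have h0 : (l.take k)[0]'(by simpa using by omega) = l[0]'(by omega) := by
              simp [List.getElem_take]
            exact h0 ▸ List.getElem_mem _
          rw [hdrop]
          refine pvPC_perm ?_
          have hperm := pvSet_perm_erase (l[0]'(by omega)) (l[k]'hkl) l.tail (k - 1) hlt htk.symm hne
          rwa [← pvCons_head_tail l (by omega)] at hperm
      rw [hbody, hnext, ihm (k + 1) _ (by omega)]
      rw [Finset.sum_eq_sum_Ico_succ_bot hklt]
      rw [if_neg (by rwa [hgetD]), hgetD, ← hval]
      rw [Prod.mk.injEq]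
      constructor
      · push_cast
        ring
      · rfl

lemma pvGoA_spec : ∀ (fuel : ℕ) (w : List Int) (p : ℕ), w.length - p < fuel →
    pvGoA fuel w (p : ℤ) = (((pvPC (w.drop p) : ℕ) : ℤ), w)
  | 0, _, _, h => absurd h (by omega)
  | fuel + 1, w, p, h => by
    rw [pvGoA_succ, PySem.List.len_eq]
    split_ifs with hbase
    · have hshort : (w.drop p).length ≤ 1 := by
        rw [List.length_drop]
        omega
      rw [pvPC_short hshort]
      rfl
    · have hlen : p + 1 < w.length := by omega
      have hfuel : w.length - (p + 1) < fuel := by omega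
      have hIH : ∀ (w' : List Int), w'.length - (p + 1) < fuel →
          pvGoA fuel w' ((p : ℤ) + 1) = (((pvPC (w'.drop (p + 1)) : ℕ) : ℤ), w') := by
        intro w' h'
        rw [show ((p : ℤ) + 1) = (((p + 1 : ℕ)) : ℤ) by push_cast; ring]
        exact pvGoA_spec fuel w' (p + 1) h'
      have hloop := pvLoop fuel w p hIH hlen hfuel (w.length - p) 0 0 (by omega)
      simp only [Nat.cast_zero, add_zero] at hloop
      rw [hloop]
      have hsum : ∑ j ∈ Finset.Ico 0 (w.length - p),
          (if (w.drop p).getD j 0 ∈ (w.drop p).take j then 0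
           else pvPC ((w.drop p).erase ((w.drop p).getD j 0)))
          = pvPC (w.drop p) := by
        set l := w.drop p with hl
        have hlen' : w.length - p = l.length := by simp [hl]
        rw [hlen', ← Finset.range_eq_Ico]
        have hcongr : ∑ j ∈ Finset.range l.length,
            (if l.getD j 0 ∈ l.take j then 0 else pvPC (l.erase (l.getD j 0)))
            = ∑ j ∈ Finset.range l.length,
            (if l.getD j 0 ∈ (∅ : Finset Int) ∨ l.getD j 0 ∈ l.take j then 0
             else pvPC (l.erase (l.getD j 0))) := by
          refine Finset.sum_congr rfl (fun j _ => ?_)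
          refine (if_congr ?_ rfl rfl)
          simp
        rw [hcongr, pvFirstOcc_sum (fun x => pvPC (l.erase x)) l ∅, Finset.sdiff_empty]
        refine pvPC_rec ?_
        intro hnil
        rw [hnil] at hlen'
        simp at hlen'
        omega
      rw [hsum]
      simp

-- ===== VERDICT (by name: the statement is the Claim_ definition above) =====
theorem num_different_permutations_helper_spec : Claim_equal_num_different_permutations_helper := by
  intro word index _ hpre
  unfold Spec_num_different_permutations_helper
  have hp : index = ((index.toNat : ℕ) : ℤ) := (Int.toNat_of_nonneg hpre).symm
  rw [hp]
  unfold num_different_permutations_helper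
  rw [pvGoA_spec (word.length + 1 + ((index.toNat : ℤ)).natAbs) word index.toNat (by omega), pvAlt_spec]
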